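-- pv_equiv track=rewrite | github.com/kh277/BOJ | 백준/Gold/30472. 호반우가 학교에 지각한 이유 5/호반우가 학교에 지각한 이유 5.py | solve
-- ===== SOURCE A (Python) =====
-- def solve(N, card):
--     card.sort(key= lambda x: (x[1]-x[0]))
--
--     ground = 0
--     curH = 0
--     accH = 0
--     for i in range(N):
--         u, d = card[i]
--         curH += u
--         accH += curH
--         curH -= d
--         ground = min(ground, curH)
--
--     return accH - ground*N
-- ===== SOURCE B (Python) =====
-- def solve(N, card):
--     card.sort(key=lambda x: x[1] - x[0])
--     n = max(N, 0)
--     cards = card[:n]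
--     # closed-form total: card j contributes u*(n-j) - d*(n-1-j) to the accumulated height
--     accH = sum(u * (n - j) - d * (n - 1 - j) for j, (u, d) in enumerate(cards))
--     # lowest ground level = total net - best suffix sum, found by one backward scan
--     best = 0
--     suf = 0
--     for u, d in reversed(cards):
--         suf += u - d
--         best = max(best, suf)
--     return accH - (suf - best) * N
-- ===== Notes on version B (the rewrite author's own statement) =====
-- stated objective: alternative
-- what changed: Instead of A's forward scan with running current-height/accumulated-height/minimum accumulators, B computes the accumulated height by a closed-form weighted sum (card j contributes u*(n-j) - d*(n-1-j)) and the lowest ground level by a single backward scan tracking the maximum suffix sum of net heights (min prefix = total - max suffix).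
import Mathlib
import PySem

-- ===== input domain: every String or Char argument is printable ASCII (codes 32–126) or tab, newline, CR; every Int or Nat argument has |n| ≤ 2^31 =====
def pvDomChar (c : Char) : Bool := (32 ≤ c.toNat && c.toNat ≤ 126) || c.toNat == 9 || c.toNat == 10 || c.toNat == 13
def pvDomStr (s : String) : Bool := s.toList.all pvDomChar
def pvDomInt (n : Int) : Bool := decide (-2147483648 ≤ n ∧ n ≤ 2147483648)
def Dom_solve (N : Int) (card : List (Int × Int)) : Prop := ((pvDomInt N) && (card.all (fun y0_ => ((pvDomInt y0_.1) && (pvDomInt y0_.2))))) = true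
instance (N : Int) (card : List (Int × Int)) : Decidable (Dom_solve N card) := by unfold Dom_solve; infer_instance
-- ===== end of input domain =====

-- B replaces A's forward three-accumulator scan by a closed-form weighted sum for the accumulated
-- height plus one backward scan for the maximum suffix sum; equivalence is about the return value
-- (both Pythons sort `card` in place the same way).

-- ===== PORT A =====
def solve (N : Int) (card : List (Int × Int)) : Int :=
  let sc := PySem.List.sorted card (fun x => x.2 - x.1) false
  let st := (PySem.List.pyRange 0 N 1).foldl (fun (st : Int × Int × Int) i =>
      let ud := PySem.List.pyGetD sc i (0, 0)
      let curH := st.2.1 + ud.1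
      let accH := st.2.2 + curH
      let curH2 := curH - ud.2
      (min st.1 curH2, curH2, accH)) (0, 0, 0)
  st.2.2 - st.1 * N

-- ===== PORT B =====
def solve_alt (N : Int) (card : List (Int × Int)) : Int :=
  let sc := PySem.List.sorted card (fun x => x.2 - x.1) false
  let n : Int := max N 0
  let cards := PySem.List.slice sc none (some n)
  let accH := ((PySem.List.enumerate cards 0).map
      (fun p => p.2.1 * (n - p.1) - p.2.2 * (n - 1 - p.1))).sum
  let st := cards.reverse.foldl (fun (st : Int × Int) ud =>
      (max st.1 (st.2 + ud.1 - ud.2), st.2 + ud.1 - ud.2)) (0, 0)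
  accH - (st.2 - st.1) * N

-- ===== PRECONDITION & SPEC =====
-- Pre_ excludes N > len(card), where A raises IndexError reading card[i].
def Pre_solve (N : Int) (card : List (Int × Int)) : Prop := N ≤ (card.length : Int)
instance (N : Int) (card : List (Int × Int)) : Decidable (Pre_solve N card) := by unfold Pre_solve; infer_instance
def pvWitness_solve : Int × (List (Int × Int)) := (2, [(1, 2), (3, 1)])

def Spec_solve (N : Int) (card : List (Int × Int)) (out : Int) : Prop := out = solve_alt N card
instance (N : Int) (card : List (Int × Int)) (out : Int) : Decidable (Spec_solve N card out) := by unfold Spec_solve; infer_instance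

-- ===== CLAIM (what is proved, stated in full; the proofs are below) =====
def Claim_equal_solve : Prop := ∀ (N : Int) (card : List (Int × Int)), Dom_solve N card → Pre_solve N card → Spec_solve N card (solve N card)

-- ===== LEMMAS AND PROOFS =====

-- prefix sums of net heights, A's running minimum and A's running accH, in closed recursive form
def pref (l : List (Int × Int)) : Nat → Int
  | 0 => 0
  | k + 1 => pref l k + (l.getD k (0, 0)).1 - (l.getD k (0, 0)).2

def gmin (l : List (Int × Int)) : Nat → Int
  | 0 => 0
  | k + 1 => min (gmin l k) (pref l (k + 1))

def acc (l : List (Int × Int)) : Nat → Int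
  | 0 => 0
  | k + 1 => acc l k + pref l k + (l.getD k (0, 0)).1

-- A's fold computes (gmin, pref, acc)
theorem aFold_eq (l : List (Int × Int)) (n : Nat) :
    (PySem.List.pyRange 0 (n : Int) 1).foldl (fun (st : Int × Int × Int) i =>
      let ud := PySem.List.pyGetD l i (0, 0)
      let curH := st.2.1 + ud.1
      let accH := st.2.2 + curH
      let curH2 := curH - ud.2
      (min st.1 curH2, curH2, accH)) (0, 0, 0) = (gmin l n, pref l n, acc l n) := by
  induction n with
  | zero => simp [PySem.List.pyRange_one_eq_nil, gmin, pref, acc]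
  | succ k ih =>
    rw [show ((k + 1 : Nat) : Int) = (k : Int) + 1 by push_cast; ring,
        PySem.List.pyRange_one_succ_right (by positivity), List.foldl_append, ih]
    simp only [List.foldl_cons, List.foldl_nil, gmin, pref, acc,
      PySem.List.pyGetD_natCast, Prod.mk.injEq]
    refine ⟨trivial, trivial, by ring⟩

-- reading the first n elements through `take n` changes nothing
theorem getD_take (l : List (Int × Int)) (n k : Nat) (h : k < n) :
    (l.take n).getD k (0, 0) = l.getD k (0, 0) := by
  simp [List.getD_eq_getElem?_getD, List.getElem?_take_of_lt h]

theorem pref_take (l : List (Int × Int)) (n : Nat) :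
    ∀ k, k ≤ n → pref (l.take n) k = pref l k := by
  intro k
  induction k with
  | zero => intro _; rfl
  | succ j ih =>
    intro h
    show pref (l.take n) j + ((l.take n).getD j (0, 0)).1 - ((l.take n).getD j (0, 0)).2
      = pref l j + (l.getD j (0, 0)).1 - (l.getD j (0, 0)).2
    rw [ih (by omega), getD_take l n j (by omega)]

theorem gmin_take (l : List (Int × Int)) (n : Nat) :
    ∀ k, k ≤ n → gmin (l.take n) k = gmin l k := by
  intro k
  induction k with
  | zero => intro _; rfl
  | succ j ih =>
    intro h
    show min (gmin (l.take n) j) (pref (l.take n) (j + 1)) = min (gmin l j) (pref l (j + 1))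
    rw [ih (by omega), pref_take l n (j + 1) (by omega)]

theorem acc_take (l : List (Int × Int)) (n : Nat) :
    ∀ k, k ≤ n → acc (l.take n) k = acc l k := by
  intro k
  induction k with
  | zero => intro _; rfl
  | succ j ih =>
    intro h
    show acc (l.take n) j + pref (l.take n) j + ((l.take n).getD j (0, 0)).1
      = acc l j + pref l j + (l.getD j (0, 0)).1
    rw [ih (by omega), pref_take l n j (by omega), getD_take l n j (by omega)]

theorem pref_cons (x : Int × Int) (c : List (Int × Int)) (j : Nat) :
    pref (x :: c) (j + 1) = (x.1 - x.2) + pref c j := by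
  induction j with
  | zero => show (0 : Int) + x.1 - x.2 = x.1 - x.2 + 0; ring
  | succ k ih =>
    show pref (x :: c) (k + 1) + ((x :: c).getD (k + 1) (0, 0)).1
        - ((x :: c).getD (k + 1) (0, 0)).2
      = x.1 - x.2 + pref c (k + 1)
    rw [ih, List.getD_cons_succ]
    show _ = x.1 - x.2 + (pref c k + (c.getD k (0, 0)).1 - (c.getD k (0, 0)).2)
    ring

theorem gmin_cons (x : Int × Int) (c : List (Int × Int)) (j : Nat) :
    gmin (x :: c) (j + 1) = min 0 ((x.1 - x.2) + gmin c j) := by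
  induction j with
  | zero =>
    show min (0 : Int) (pref (x :: c) 1) = _
    rw [pref_cons]
    show min (0 : Int) (x.1 - x.2 + 0) = min 0 (x.1 - x.2 + 0)
    rfl
  | succ k ih =>
    show min (gmin (x :: c) (k + 1)) (pref (x :: c) (k + 1 + 1)) = _
    rw [ih, pref_cons]
    show _ = min 0 (x.1 - x.2 + min (gmin c k) (pref c (k + 1)))
    omega

theorem acc_cons (x : Int × Int) (c : List (Int × Int)) (j : Nat) :
    acc (x :: c) (j + 1) = x.1 + (j : Int) * (x.1 - x.2) + acc c j := by
  induction j with
  | zero =>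
    show (0 : Int) + 0 + x.1 = x.1 + (0 : Int) * (x.1 - x.2) + 0
    ring
  | succ k ih =>
    show acc (x :: c) (k + 1) + pref (x :: c) (k + 1) + ((x :: c).getD (k + 1) (0, 0)).1
      = x.1 + ((k + 1 : Nat) : Int) * (x.1 - x.2) + acc c (k + 1)
    rw [ih, pref_cons, List.getD_cons_succ]
    show _ = x.1 + ((k + 1 : Nat) : Int) * (x.1 - x.2)
        + (acc c k + pref c k + (c.getD k (0, 0)).1)
    push_cast
    ring

-- B's backward scan: total net height and best suffix sum
def tot : List (Int × Int) → Int
  | [] => 0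
  | x :: c => tot c + x.1 - x.2

def bst : List (Int × Int) → Int
  | [] => 0
  | x :: c => max (bst c) (tot c + x.1 - x.2)

theorem bFold_eq (c : List (Int × Int)) :
    c.reverse.foldl (fun (st : Int × Int) ud =>
      (max st.1 (st.2 + ud.1 - ud.2), st.2 + ud.1 - ud.2)) (0, 0) = (bst c, tot c) := by
  induction c with
  | nil => rfl
  | cons x c ih =>
    simp only [List.reverse_cons, List.foldl_append, ih, List.foldl_cons, List.foldl_nil,
      bst, tot]

-- the lowest ground level: min prefix = total - best suffix
theorem gmin_eq_tot_sub_bst (c : List (Int × Int)) :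
    gmin c c.length = tot c - bst c := by
  induction c with
  | nil => rfl
  | cons x c ih =>
    simp only [List.length_cons, gmin_cons, ih, tot, bst]
    omega

-- B's weighted sum over the enumeration equals A's accumulated height
theorem wsum_eq_acc (c : List (Int × Int)) :
    ∀ (s m : Int), m - s = (c.length : Int) →
    ((PySem.List.enumerate c s).map
        (fun p => p.2.1 * (m - p.1) - p.2.2 * (m - 1 - p.1))).sum = acc c c.length := by
  induction c with
  | nil => intro s m _; simp [PySem.List.enumerate_nil, acc]
  | cons x c ih =>
    intro s m h
    have hlc : (List.length (x :: c) : Int) = (c.length : Int) + 1 := by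
      simp [List.length_cons]
    rw [hlc] at h
    simp only [PySem.List.enumerate_cons, List.map_cons, List.sum_cons]
    rw [ih (s + 1) m (by omega)]
    have hacc : acc (x :: c) (x :: c).length = acc (x :: c) (c.length + 1) := by
      rw [List.length_cons]
    rw [hacc, acc_cons]
    have hm : m = s + (c.length : Int) + 1 := by omega
    subst hm
    ring

theorem solve_eq_alt (N : Int) (card : List (Int × Int)) (hpre : Pre_solve N card) :
    solve N card = solve_alt N card := by
  have hlen : (PySem.List.sorted card (fun x => x.2 - x.1) false).length = card.length :=
    PySem.List.length_sorted ..
  simp only [solve, solve_alt]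
  by_cases hle : N ≤ 0
  · rw [PySem.List.pyRange_one_eq_nil hle]
    have hn : max N 0 = (0 : Int) := by omega
    rw [hn, PySem.List.slice_to _ (by omega)]
    simp [PySem.List.enumerate_nil]
  · -- 0 < N ≤ len card
    set sc := PySem.List.sorted card (fun x => x.2 - x.1) false with hsc
    have hN0 : 0 ≤ N := by omega
    have hNle : N.toNat ≤ sc.length := by
      rw [hlen]; unfold Pre_solve at hpre; omega
    have hNeq : N = ((N.toNat : Nat) : Int) := (Int.toNat_of_nonneg hN0).symm
    have hn : max N 0 = N := by omega
    rw [hn, PySem.List.slice_to _ hN0]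
    set c := sc.take N.toNat with hc
    have hclen : c.length = N.toNat := by
      rw [hc, List.length_take]; omega
    rw [hNeq, aFold_eq]
    rw [← gmin_take sc N.toNat N.toNat (le_refl _), ← acc_take sc N.toNat N.toNat (le_refl _)]
    rw [← hc, ← hclen, bFold_eq, gmin_eq_tot_sub_bst]
    rw [wsum_eq_acc c 0 ((c.length : Nat) : Int) (by omega)]

-- ===== VERDICT (by name: the statement is the Claim_ definition above) =====
theorem solve_spec : Claim_equal_solve := by
  intro N card _ hpre
  unfold Spec_solve
  exact solve_eq_alt N card hpre
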